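-- pv_equiv track=rewrite | github.com/RDNordic/ai-championship-warroom | submissions/grocerybot-ko-version/src/grocerybot/strategies/medium_v2.py | _counter_subtract
-- ===== SOURCE A (Python) =====
-- from collections import Counter
--
-- def _counter_subtract(
--     a: Counter[str],
--     b: Counter[str],
-- ) -> Counter[str]:
--     out: Counter[str] = Counter(a)
--     for key, value in b.items():
--         if key in out:
--             out[key] = max(0, out[key] - value)
--             if out[key] == 0:
--                 out.pop(key, None)
--     return out
-- ===== SOURCE B (Python) =====
-- from collections import Counter
--
-- def _counter_subtract(a, b):
--     # Build the result fresh by iterating a's items; b-only keys are ignored.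
--     out: Counter[str] = Counter()
--     for key, val in a.items():
--         if key in b:
--             nv = max(0, val - b[key])
--             if nv != 0:
--                 out[key] = nv
--         else:
--             out[key] = val
--     return out
-- ===== Notes on version B (the rewrite author's own statement) =====
-- stated objective: alternative
-- what changed: B builds the result Counter fresh in a single pass over a's items (carry / clamp-and-keep / drop per key) instead of A's copy-of-a then in-place mutation driven by a loop over b's items; the loop is driven by the other collection and there is no mutation of a copy.
import Mathlib
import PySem

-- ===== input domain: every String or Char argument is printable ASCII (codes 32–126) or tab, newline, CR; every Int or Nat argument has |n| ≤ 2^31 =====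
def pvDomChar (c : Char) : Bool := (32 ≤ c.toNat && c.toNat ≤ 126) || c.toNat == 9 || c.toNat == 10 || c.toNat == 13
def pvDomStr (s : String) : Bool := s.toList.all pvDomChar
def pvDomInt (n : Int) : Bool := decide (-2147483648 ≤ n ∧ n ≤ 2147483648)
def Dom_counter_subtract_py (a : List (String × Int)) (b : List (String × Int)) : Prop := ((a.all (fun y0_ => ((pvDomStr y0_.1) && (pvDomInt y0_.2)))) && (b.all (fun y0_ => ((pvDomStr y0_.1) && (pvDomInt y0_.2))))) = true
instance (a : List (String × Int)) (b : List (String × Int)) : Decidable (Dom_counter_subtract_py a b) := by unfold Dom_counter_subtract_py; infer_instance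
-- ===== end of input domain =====

-- B builds the result Counter fresh in one pass over a's items (keep / clamp / drop per key),
-- instead of A's copy-of-a-then-mutate driven by a loop over b's items; objective: alternative decomposition, same cost.

-- ===== PORT A =====
-- The dict arguments are read with Python dict semantics (PySem.Dict.ofList: last value wins, first position kept).
def counter_subtract_py (a : List (String × Int)) (b : List (String × Int)) : List (String × Int) :=
  let out0 : PySem.Dict String Int := PySem.Dict.ofList a       -- out = Counter(a)
  ((PySem.Dict.ofList b).items.foldl (fun out kv =>             -- for key, value in b.items():
      if out.contains kv.1 then                                 --   if key in out:
        let out1 := out.insert kv.1 (max 0 (out.getD kv.1 0 - kv.2))  -- out[key] = max(0, out[key] - value)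
        if out1.getD kv.1 0 = 0 then out1.erase kv.1 else out1  --     if out[key] == 0: out.pop(key, None)
      else out) out0).items

-- ===== PORT B =====
def counter_subtract_py_alt (a : List (String × Int)) (b : List (String × Int)) : List (String × Int) :=
  let db : PySem.Dict String Int := PySem.Dict.ofList b
  ((PySem.Dict.ofList a).items.foldl (fun out kv =>             -- for key, val in a.items():
      match db.get? kv.1 with                                   --   if key in b:
      | some bv =>                                              --     nv = max(0, val - b[key])
          if max 0 (kv.2 - bv) ≠ 0 then out.insert kv.1 (max 0 (kv.2 - bv)) else out  -- if nv != 0: out[key] = nv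
      | none => out.insert kv.1 kv.2)                           --   else: out[key] = val
    (PySem.Dict.empty : PySem.Dict String Int)).items

-- ===== PRECONDITION & SPEC =====
def Spec_counter_subtract_py (a : List (String × Int)) (b : List (String × Int)) (out : List (String × Int)) : Prop := out = counter_subtract_py_alt a b
instance (a : List (String × Int)) (b : List (String × Int)) (out : List (String × Int)) : Decidable (Spec_counter_subtract_py a b out) := by unfold Spec_counter_subtract_py; infer_instance

-- ===== CLAIM (what is proved, stated in full; the proofs are below) =====
def Claim_equal_counter_subtract_py : Prop := ∀ (a : List (String × Int)) (b : List (String × Int)), Dom_counter_subtract_py a b → Spec_counter_subtract_py a b (counter_subtract_py a b)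

-- ===== LEMMAS AND PROOFS =====

-- Per-key effect of the whole subtraction, read off the raw list bs of b's items.
def subSpec (bs : List (String × Int)) (p : String × Int) : Option (String × Int) :=
  match (bs.find? (fun q => q.1 == p.1)).map Prod.snd with
  | some bv => if max 0 (p.2 - bv) ≠ 0 then some (p.1, max 0 (p.2 - bv)) else none
  | none => some p

theorem subSpec_cons_ne (k : String) (v : Int) (t : List (String × Int)) (p : String × Int)
    (h : p.1 ≠ k) : subSpec ((k, v) :: t) p = subSpec t p := by
  simp [subSpec, (by simpa using h.symm : (k == p.1) = false)]

-- A's loop over b's items turns d.items into its filterMap by subSpec.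
theorem foldlA_items (bs : List (String × Int)) (d : PySem.Dict String Int)
    (hd : d.keys.Nodup) (hbs : (bs.map Prod.fst).Nodup) :
    (bs.foldl (fun out kv =>
      if out.contains kv.1 then
        if (out.insert kv.1 (max 0 (out.getD kv.1 0 - kv.2))).getD kv.1 0 = 0 then
          (out.insert kv.1 (max 0 (out.getD kv.1 0 - kv.2))).erase kv.1
        else out.insert kv.1 (max 0 (out.getD kv.1 0 - kv.2))
      else out) d).items = d.items.filterMap (subSpec bs) := by
  induction bs generalizing d with
  | nil => simp [subSpec]
  | cons kv t ih =>
    obtain ⟨k, v⟩ := kv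
    have hknot : k ∉ t.map Prod.fst := by simpa using (List.nodup_cons.mp hbs).1
    have htl : (t.map Prod.fst).Nodup := (List.nodup_cons.mp hbs).2
    simp only [List.foldl_cons]
    by_cases hc : d.contains k = true
    · -- key k present in out
      have hgd : ∀ p ∈ d.items, p.1 = k → p.2 = d.getD k 0 := by
        intro p hp hpk
        have : (k, p.2) ∈ d.items := by
          have : p = (k, p.2) := by rw [← hpk]
          rwa [this] at hp
        exact (PySem.Dict.getD_of_mem_items d this hd 0).symm
      rw [if_pos hc, PySem.Dict.getD_insert_self]
      by_cases hz : max 0 (d.getD k 0 - v) = 0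
      · rw [if_pos hz]
        -- items of (insert then erase) = original items with the key-k entry dropped
        have hitems : ((d.insert k (max 0 (d.getD k 0 - v))).erase k).items
            = d.items.filter (fun p => !(p.1 == k)) := by
          show ((d.insert k (max 0 (d.getD k 0 - v))).items.filter (fun p => !(p.1 == k)))
              = d.items.filter (fun p => !(p.1 == k))
          rw [PySem.Dict.items_insert_of_contains d _ hc, List.filter_map]
          have h1 : d.items.filter ((fun p => !(p.1 == k)) ∘
              (fun p => if (p.1 == k) = true then (k, max 0 (d.getD k 0 - v)) else p))
              = d.items.filter (fun p => !(p.1 == k)) := by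
            apply List.filter_congr
            intro p _
            by_cases hpk : p.1 = k <;> simp [hpk]
          rw [h1, List.map_congr_left, List.map_id]
          intro p hp
          have := (List.mem_filter.mp hp).2
          simp only [Bool.not_eq_eq_eq_not, Bool.not_true, beq_eq_false_iff_ne] at this
          simp [this]
        have hnodup2 : ((d.insert k (max 0 (d.getD k 0 - v))).erase k).keys.Nodup := by
          show (((d.insert k (max 0 (d.getD k 0 - v))).erase k).items.map Prod.fst).Nodup
          rw [hitems]
          exact hd.sublist (List.Sublist.map Prod.fst (List.filter_sublist))
        rw [ih _ hnodup2 htl, hitems, List.filterMap_filter]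
        apply List.filterMap_congr
        intro p hp
        by_cases hpk : p.1 = k
        · have hv2 : max 0 (p.2 - v) = 0 := by rw [hgd p hp hpk]; exact hz
          simp [subSpec, hpk, hv2]
        · simp [(by simpa using hpk : (p.1 == k) = false), subSpec_cons_ne k v t p hpk]
      · rw [if_neg hz]
        rw [ih _ (PySem.Dict.nodup_keys_insert _ _ _ hd) htl,
            PySem.Dict.items_insert_of_contains d _ hc, List.filterMap_map]
        have hfind : t.find? (fun q => q.1 == k) = none :=
          List.find?_eq_none.mpr (fun q hq hqk =>
            hknot ((by simpa using hqk : q.1 = k) ▸ List.mem_map_of_mem (f := Prod.fst) hq))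
        apply List.filterMap_congr
        intro p hp
        simp only [Function.comp_apply]
        by_cases hpk : p.1 = k
        · rw [if_pos (by simpa using hpk)]
          simp [subSpec, hfind, hpk, ← hgd p hp hpk]
          have hev := hgd p hp hpk
          omega
        · rw [if_neg (by simpa using hpk), subSpec_cons_ne k v t p hpk]
    · rw [if_neg hc]
      rw [ih d hd htl]
      apply List.filterMap_congr
      intro p hp
      have hpk : p.1 ≠ k := by
        intro he
        have : d.items.any (fun q => q.1 == k) = true :=
          List.any_eq_true.mpr ⟨p, hp, by simp [he]⟩
        exact absurd this (by simpa [PySem.Dict.contains] using hc)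
      exact (subSpec_cons_ne k v t p hpk).symm

-- B's loop over fresh distinct keys appends the filterMap.
theorem foldlB_items (db : PySem.Dict String Int) (l : List (String × Int)) (acc : PySem.Dict String Int)
    (hacc : acc.keys.Nodup) (hl : (l.map Prod.fst).Nodup)
    (hdisj : ∀ p ∈ l, acc.contains p.1 = false) :
    (l.foldl (fun out kv =>
      match db.get? kv.1 with
      | some bv => if max 0 (kv.2 - bv) ≠ 0 then out.insert kv.1 (max 0 (kv.2 - bv)) else out
      | none => out.insert kv.1 kv.2) acc).items
    = acc.items ++ l.filterMap (subSpec db.items) := by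
  induction l generalizing acc with
  | nil => simp
  | cons kv t ih =>
    have hkv : acc.contains kv.1 = false := hdisj kv (by simp)
    have hknot : kv.1 ∉ t.map Prod.fst := by simpa using (List.nodup_cons.mp hl).1
    have htl : (t.map Prod.fst).Nodup := (List.nodup_cons.mp hl).2
    have hspec : subSpec db.items kv = (match db.get? kv.1 with
        | some bv => if max 0 (kv.2 - bv) ≠ 0 then some (kv.1, max 0 (kv.2 - bv)) else none
        | none => some kv) := by
      simp only [subSpec, PySem.Dict.get?]
    have hfresh : ∀ (w : Int), ∀ p ∈ t, (acc.insert kv.1 w).contains p.1 = false := by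
      intro w p hp
      rw [PySem.Dict.contains_insert]
      have : p.1 ≠ kv.1 := fun he => hknot (he ▸ List.mem_map_of_mem hp)
      simp [this, hdisj p (List.mem_cons_of_mem _ hp)]
    simp only [List.foldl_cons, List.filterMap_cons, hspec]
    cases hg : db.get? kv.1 with
    | none =>
      simp only []
      rw [ih (acc.insert kv.1 kv.2) (PySem.Dict.nodup_keys_insert _ _ _ hacc) htl (hfresh _),
          PySem.Dict.items_insert_of_not_contains _ _ hkv]
      simp
    | some bv =>
      simp only []
      by_cases hnv : max 0 (kv.2 - bv) ≠ 0
      · rw [if_pos hnv, if_pos hnv,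
            ih (acc.insert kv.1 (max 0 (kv.2 - bv))) (PySem.Dict.nodup_keys_insert _ _ _ hacc) htl (hfresh _),
            PySem.Dict.items_insert_of_not_contains _ _ hkv]
        simp
      · rw [if_neg hnv, if_neg hnv,
            ih acc hacc htl (fun p hp => hdisj p (List.mem_cons_of_mem _ hp))]

-- ===== VERDICT (by name: the statement is the Claim_ definition above) =====
theorem counter_subtract_py_spec : Claim_equal_counter_subtract_py := by
  intro a b _
  unfold Spec_counter_subtract_py counter_subtract_py counter_subtract_py_alt
  simp only []
  rw [foldlA_items _ _ (PySem.Dict.nodup_keys_ofList a) (PySem.Dict.nodup_keys_ofList b),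
      foldlB_items _ _ _ (by simp [PySem.Dict.keys_empty]) (PySem.Dict.nodup_keys_ofList a)
        (fun p _ => by simp [PySem.Dict.contains_empty])]
  simp [PySem.Dict.empty]
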